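-- pv_equiv track=rewrite | github.com/CostaCostaCosta/biased_random_forest | metrics.py | find_counts
-- ===== SOURCE A (Python) =====
-- def find_counts(actual, predicted):
--     positive = 0
--     negative = 0
--     true_positive = 0
--     false_negative = 0
--     false_positive = 0
--
--     for i in range(len(actual)):
--         if actual[i] == 1:
--             positive += 1
--         if actual[i] == 0:
--             negative += 1
--         if actual[i] == 1 and predicted[i] == 1:
--             true_positive += 1
--         if actual[i] == 1 and predicted[i] == 0:
--             false_negative += 1
--         if actual[i] == 0 and predicted[i] == 1:
--             false_positive += 1
--
--     return positive, negative, true_positive, false_positive, false_negative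
-- ===== SOURCE B (Python) =====
-- def find_counts(actual, predicted):
--     counts = {}
--     for pair in zip(actual, predicted):
--         counts[pair] = counts.get(pair, 0) + 1
--     positive = sum(v for (a, _), v in counts.items() if a == 1)
--     negative = sum(v for (a, _), v in counts.items() if a == 0)
--     return (positive, negative,
--             counts.get((1, 1), 0), counts.get((0, 1), 0), counts.get((1, 0), 0))
-- ===== Notes on version B (the rewrite author's own statement) =====
-- stated objective: alternative
-- what changed: Replaces A's five per-index conditional counters with a single frequency table of (actual, predicted) pairs built in one pass over zip, from which all five returns are computed by summing/looking up distinct pairs.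
import Mathlib
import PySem

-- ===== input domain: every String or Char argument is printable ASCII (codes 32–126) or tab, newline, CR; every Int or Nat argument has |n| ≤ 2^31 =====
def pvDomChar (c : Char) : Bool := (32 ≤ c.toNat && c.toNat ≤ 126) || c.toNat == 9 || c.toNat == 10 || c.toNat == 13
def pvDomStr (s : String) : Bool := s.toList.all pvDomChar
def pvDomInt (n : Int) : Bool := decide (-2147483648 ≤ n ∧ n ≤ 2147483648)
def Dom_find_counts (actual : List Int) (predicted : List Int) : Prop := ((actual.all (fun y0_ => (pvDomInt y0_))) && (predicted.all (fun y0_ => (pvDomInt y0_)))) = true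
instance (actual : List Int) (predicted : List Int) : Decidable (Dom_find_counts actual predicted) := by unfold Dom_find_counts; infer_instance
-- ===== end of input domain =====

-- B replaces A's five per-index conditional counters with one frequency table of
-- (actual, predicted) pairs plus arithmetic over its distinct entries (objective: alternative).


-- ===== PORT A =====
def find_counts (actual : List Int) (predicted : List Int) : Int × Int × Int × Int × Int :=
  let r := (PySem.List.pyRange 0 (actual.length : Int) 1).foldl
    (fun (st : Int × Int × Int × Int × Int) i =>
      let positive := if PySem.List.pyGetD actual i 0 = 1 then st.1 + 1 else st.1
      let negative := if PySem.List.pyGetD actual i 0 = 0 then st.2.1 + 1 else st.2.1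
      let tp := if PySem.List.pyGetD actual i 0 = 1 ∧ PySem.List.pyGetD predicted i 0 = 1 then st.2.2.1 + 1 else st.2.2.1
      let fn := if PySem.List.pyGetD actual i 0 = 1 ∧ PySem.List.pyGetD predicted i 0 = 0 then st.2.2.2.1 + 1 else st.2.2.2.1
      let fp := if PySem.List.pyGetD actual i 0 = 0 ∧ PySem.List.pyGetD predicted i 0 = 1 then st.2.2.2.2 + 1 else st.2.2.2.2
      (positive, negative, tp, fn, fp))
    (0, 0, 0, 0, 0)
  (r.1, r.2.1, r.2.2.1, r.2.2.2.2, r.2.2.2.1)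

-- ===== PORT B =====
def find_counts_alt (actual : List Int) (predicted : List Int) : Int × Int × Int × Int × Int :=
  let pairs := actual.zip predicted
  let counts := pairs.foldl (fun (d : PySem.Dict (Int × Int) Int) pr => d.modify pr 0 (· + 1)) PySem.Dict.empty
  let positive := counts.items.foldl (fun (s : Int) kv => if kv.1.1 = 1 then s + kv.2 else s) 0
  let negative := counts.items.foldl (fun (s : Int) kv => if kv.1.1 = 0 then s + kv.2 else s) 0
  (positive, negative, counts.getD (1, 1) 0, counts.getD (0, 1) 0, counts.getD (1, 0) 0)

-- ===== PRECONDITION & SPEC =====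
-- Pre_ excludes exactly the inputs on which A raises IndexError: an index ≥ len(predicted)
-- whose actual label is 0 or 1 (only there does A read predicted[i]).
def Pre_find_counts (actual : List Int) (predicted : List Int) : Prop :=
  ((actual.drop predicted.length).all (fun a => !(a == 0) && !(a == 1))) = true
instance (actual : List Int) (predicted : List Int) : Decidable (Pre_find_counts actual predicted) := by unfold Pre_find_counts; infer_instance
def pvWitness_find_counts : List Int × List Int := ([1, 0, 1, 1], [1, 1, 0, 1])

def Spec_find_counts (actual : List Int) (predicted : List Int) (out : Int × Int × Int × Int × Int) : Prop := out = find_counts_alt actual predicted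
instance (actual : List Int) (predicted : List Int) (out : Int × Int × Int × Int × Int) : Decidable (Spec_find_counts actual predicted out) := by unfold Spec_find_counts; infer_instance

-- ===== CLAIM (what is proved, stated in full; the proofs are below) =====
def Claim_equal_find_counts : Prop := ∀ (actual : List Int) (predicted : List Int), Dom_find_counts actual predicted → Pre_find_counts actual predicted → Spec_find_counts actual predicted (find_counts actual predicted)

-- ===== LEMMAS AND PROOFS =====

-- the five counts over the aligned pair list, the common value of both programs
def pvCounts (L : List (Int × Int)) : Int × Int × Int × Int × Int :=
  ((L.countP (fun x => decide (x.1 = 1)) : Int), (L.countP (fun x => decide (x.1 = 0)) : Int),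
   (L.count (1, 1) : Int), (L.count (0, 1) : Int), (L.count (1, 0) : Int))

lemma foldl_if_add {α : Type} (p : α → Prop) [DecidablePred p] (c : α → Int) (ks : List α) (s : Int) :
    ks.foldl (fun s k => if p k then s + c k else s) s
      = s + ((ks.filter (fun k => decide (p k))).map c).sum := by
  induction ks generalizing s with
  | nil => simp
  | cons k ks ih => by_cases h : p k <;> simp [h, ih, add_assoc]

-- B-side: summing the counter's entries whose key satisfies p is countP p over the list
lemma counter_sum (L : List (Int × Int)) (p : (Int × Int) → Prop) [DecidablePred p] :
    (PySem.Dict.counter L).items.foldl (fun (s : Int) kv => if p kv.1 then s + kv.2 else s) 0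
      = (L.countP (fun k => decide (p k)) : Int) := by
  rw [PySem.Dict.items_counter, List.foldl_map, foldl_if_add p (fun k => (L.count k : Int))]
  have hperm : (PySem.Set.ofList L).Perm L.dedup :=
    (List.perm_ext_iff_of_nodup (PySem.Set.nodup_ofList L) L.nodup_dedup).mpr
      (by intro a; simp [PySem.Set.mem_ofList, List.mem_dedup])
  rw [List.Perm.sum_eq (((hperm.filter _).map _))]
  have h2 := List.sum_map_count_dedup_filter_eq_countP (fun k => decide (p k)) L
  simp only [List.count_eq_countP, beq_eq_decide] at h2 ⊢
  simpa [Nat.cast_list_sum, List.map_map, Function.comp_def] using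
    congrArg (Nat.cast : Nat → Int) h2

lemma alt_eq (actual predicted : List Int) :
    find_counts_alt actual predicted = pvCounts (actual.zip predicted) := by
  show (let counts := (actual.zip predicted).foldl
          (fun (d : PySem.Dict (Int × Int) Int) pr => d.modify pr 0 (· + 1)) PySem.Dict.empty
        let positive := counts.items.foldl (fun (s : Int) kv => if kv.1.1 = 1 then s + kv.2 else s) 0
        let negative := counts.items.foldl (fun (s : Int) kv => if kv.1.1 = 0 then s + kv.2 else s) 0
        (positive, negative, counts.getD (1, 1) 0, counts.getD (0, 1) 0, counts.getD (1, 0) 0))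
      = pvCounts (actual.zip predicted)
  have hc : (actual.zip predicted).foldl
      (fun (d : PySem.Dict (Int × Int) Int) pr => d.modify pr 0 (· + 1)) PySem.Dict.empty
      = PySem.Dict.counter (actual.zip predicted) := (PySem.Dict.counter_eq_foldl _).symm
  simp only [hc, pvCounts]
  rw [counter_sum _ (fun kv => kv.1 = 1), counter_sum _ (fun kv => kv.1 = 0),
      PySem.Dict.getD_counter, PySem.Dict.getD_counter, PySem.Dict.getD_counter]

-- A's loop body, phrased on the pair (actual[i], predicted[i])
def pvStepP (st : Int × Int × Int × Int × Int) (pr : Int × Int) : Int × Int × Int × Int × Int :=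
  (if pr.1 = 1 then st.1 + 1 else st.1,
   if pr.1 = 0 then st.2.1 + 1 else st.2.1,
   if pr.1 = 1 ∧ pr.2 = 1 then st.2.2.1 + 1 else st.2.2.1,
   if pr.1 = 1 ∧ pr.2 = 0 then st.2.2.2.1 + 1 else st.2.2.2.1,
   if pr.1 = 0 ∧ pr.2 = 1 then st.2.2.2.2 + 1 else st.2.2.2.2)

lemma foldl_stepP (L : List (Int × Int)) :
    ∀ s : Int × Int × Int × Int × Int,
      L.foldl pvStepP s
        = (s.1 + (L.countP (fun x => decide (x.1 = 1)) : Int),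
           s.2.1 + (L.countP (fun x => decide (x.1 = 0)) : Int),
           s.2.2.1 + (L.count (1, 1) : Int),
           s.2.2.2.1 + (L.count (1, 0) : Int),
           s.2.2.2.2 + (L.count (0, 1) : Int)) := by
  induction L with
  | nil => intro s; simp
  | cons x L ih =>
      intro s
      rw [List.foldl_cons, ih]
      simp only [pvStepP, List.countP_cons, List.count_cons, Prod.mk.injEq]
      have hx : ∀ a b : Int, (x = (a, b)) ↔ (x.1 = a ∧ x.2 = b) := by
        intro a b; cases x; simp [Prod.ext_iff]
      refine ⟨?_, ?_, ?_, ?_, ?_⟩ <;> split_ifs <;> simp_all <;> ring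

lemma foldl_id {α β : Type} (f : β → α → β) (l : List α) (h : ∀ s x, x ∈ l → f s x = s) :
    ∀ s, l.foldl f s = s := by
  induction l with
  | nil => intro s; rfl
  | cons x l ih =>
      intro s
      rw [List.foldl_cons, h s x (by simp)]
      exact ih (fun s' y hy => h s' y (List.mem_cons_of_mem _ hy)) s

lemma map_range_zip (actual predicted : List Int) :
    (PySem.List.pyRange 0 ((min actual.length predicted.length : Nat) : Int) 1).map
        (fun i => (PySem.List.pyGetD actual i 0, PySem.List.pyGetD predicted i 0))
      = actual.zip predicted := by
  apply List.ext_getElem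
  · simp [PySem.List.length_pyRange_one]; omega
  · intro k h1 h2
    have hm : k < min actual.length predicted.length := by
      simpa [PySem.List.length_pyRange_one] using h1
    simp only [List.getElem_map, PySem.List.getElem_pyRange_one, List.getElem_zip]
    rw [show ((0 : Int) + k) = ((k : Nat) : Int) by simp]
    rw [PySem.List.pyGetD_natCast, PySem.List.pyGetD_natCast]
    rw [List.getD_eq_getElem _ _ (by omega), List.getD_eq_getElem _ _ (by omega)]

lemma a_eq (actual predicted : List Int) (hpre : Pre_find_counts actual predicted) :
    find_counts actual predicted = pvCounts (actual.zip predicted) := by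
  unfold find_counts
  have hstep : (fun (st : Int × Int × Int × Int × Int) (i : Int) =>
      let positive := if PySem.List.pyGetD actual i 0 = 1 then st.1 + 1 else st.1
      let negative := if PySem.List.pyGetD actual i 0 = 0 then st.2.1 + 1 else st.2.1
      let tp := if PySem.List.pyGetD actual i 0 = 1 ∧ PySem.List.pyGetD predicted i 0 = 1 then st.2.2.1 + 1 else st.2.2.1
      let fn := if PySem.List.pyGetD actual i 0 = 1 ∧ PySem.List.pyGetD predicted i 0 = 0 then st.2.2.2.1 + 1 else st.2.2.2.1
      let fp := if PySem.List.pyGetD actual i 0 = 0 ∧ PySem.List.pyGetD predicted i 0 = 1 then st.2.2.2.2 + 1 else st.2.2.2.2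
      (positive, negative, tp, fn, fp))
      = fun st i => pvStepP st (PySem.List.pyGetD actual i 0, PySem.List.pyGetD predicted i 0) := rfl
  rw [hstep]
  set m : Nat := min actual.length predicted.length with hm
  have hsplit : PySem.List.pyRange 0 (actual.length : Int) 1
      = PySem.List.pyRange 0 (m : Int) 1 ++ PySem.List.pyRange (m : Int) (actual.length : Int) 1 :=
    PySem.List.pyRange_one_append 0 (m : Int) (actual.length : Int) (by positivity) (by simp [hm])
  rw [hsplit, List.foldl_append]
  have h1 : (PySem.List.pyRange 0 (m : Int) 1).foldl
        (fun st i => pvStepP st (PySem.List.pyGetD actual i 0, PySem.List.pyGetD predicted i 0)) (0, 0, 0, 0, 0)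
      = (actual.zip predicted).foldl pvStepP (0, 0, 0, 0, 0) := by
    rw [← map_range_zip actual predicted, List.foldl_map]
  rw [h1]
  have h2 : ∀ (s : Int × Int × Int × Int × Int) (i : Int),
      i ∈ PySem.List.pyRange (m : Int) (actual.length : Int) 1 →
      pvStepP s (PySem.List.pyGetD actual i 0, PySem.List.pyGetD predicted i 0) = s := by
    intro s i hi
    rw [PySem.List.mem_pyRange_one] at hi
    have hlp : predicted.length ≤ i := by
      rcases hi with ⟨hmi, hila⟩
      omega
    have hge : (0 : Int) ≤ i := le_trans (by positivity) hi.1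
    have hlt : i < actual.length := hi.2
    have ha : PySem.List.pyGetD actual i 0 = actual[i.toNat] :=
      PySem.List.pyGetD_eq_getElem (xs := actual) (i := i) (d := 0) hge (by simpa using hlt)
    have hmem : actual[i.toNat] ∈ actual.drop predicted.length := by
      have hdrop : (actual.drop predicted.length)[i.toNat - predicted.length]'(by simp only [List.length_drop]; omega) = actual[i.toNat]'(by omega) := by
        rw [List.getElem_drop]
        congr 1
        omega
      rw [← hdrop]
      exact List.getElem_mem _
    unfold Pre_find_counts at hpre
    simp only [List.all_eq_true] at hpre
    have := hpre _ hmem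
    simp only [Bool.and_eq_true, Bool.not_eq_true', beq_eq_false_iff_ne, ne_eq] at this
    rw [ha]
    simp [pvStepP, this.1, this.2]
  rw [foldl_id _ _ h2, foldl_stepP]
  simp [pvCounts]

-- ===== VERDICT (by name: the statement is the Claim_ definition above) =====
theorem find_counts_spec : Claim_equal_find_counts := by
  intro actual predicted _ hpre
  unfold Spec_find_counts
  rw [a_eq actual predicted hpre, alt_eq]
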